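-- pv_equiv track=rewrite | github.com/ericfitz/tmi-ux | scripts/merge-translations.py | find_path_segments
-- ===== SOURCE A (Python) =====
-- def find_path_segments(flat_key: str, intermediate_paths: set[str]) -> list[str]:
--     """
--     Find the correct segmentation of a flat key based on intermediate paths.
--
--     For example, if flat_key is "threatEditor.threatPriority.0.description"
--     and intermediate_paths contains "threatEditor.threatPriority" but not
--     "threatEditor.threatPriority.0", then we know "0.description" is a
--     single key, not two segments.
--
--     intermediate_paths contains only paths that are dicts (have children),
--     not leaf value paths.
--     """
--     parts = flat_key.split(".")
--     result = []
--     current_segment_parts: list[str] = []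
--
--     for i, part in enumerate(parts):
--         current_segment_parts.append(part)
--         current_path = ".".join(parts[: i + 1])
--
--         # Check if this path is in intermediate_paths (is a dict, not a leaf)
--         if current_path in intermediate_paths:
--             # This is a nesting boundary - emit the current segment and start new one
--             result.append(".".join(current_segment_parts))
--             current_segment_parts = []
--
--     # Don't forget the last segment
--     if current_segment_parts:
--         result.append(".".join(current_segment_parts))
--
--     return result
-- ===== SOURCE B (Python) =====
-- def find_path_segments(flat_key: str, intermediate_paths: "set[str]") -> "list[str]":
--     parts = flat_key.split(".")
--     boundaries = [i for i in range(len(parts))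
--                   if ".".join(parts[: i + 1]) in intermediate_paths]
--     segments = []
--     start = 0
--     for b in boundaries:
--         segments.append(".".join(parts[start : b + 1]))
--         start = b + 1
--     if start < len(parts):
--         segments.append(".".join(parts[start:]))
--     return segments
-- ===== Notes on version B (the rewrite author's own statement) =====
-- stated objective: alternative
-- what changed: Replaces A's single interleaved scan with a running segment accumulator by two phases: first collect the boundary indices (prefixes that are intermediate paths), then cut the parts list into segments by slicing between consecutive boundaries with a start cursor.
import Mathlib
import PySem

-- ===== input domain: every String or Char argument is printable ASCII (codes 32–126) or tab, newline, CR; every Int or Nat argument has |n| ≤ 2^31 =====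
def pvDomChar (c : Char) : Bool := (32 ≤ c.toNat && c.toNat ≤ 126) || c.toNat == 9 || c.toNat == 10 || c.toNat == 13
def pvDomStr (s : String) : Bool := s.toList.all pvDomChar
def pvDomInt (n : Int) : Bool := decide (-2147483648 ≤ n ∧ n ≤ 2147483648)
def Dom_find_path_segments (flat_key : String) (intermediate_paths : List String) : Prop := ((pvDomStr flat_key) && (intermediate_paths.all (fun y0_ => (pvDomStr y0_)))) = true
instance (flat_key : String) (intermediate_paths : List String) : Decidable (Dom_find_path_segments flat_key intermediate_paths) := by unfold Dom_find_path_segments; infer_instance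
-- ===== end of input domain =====

-- B replaces A's single scan with a running segment accumulator by two phases
-- (collect boundary indices, then cut the parts list by slicing between boundaries);
-- objective: alternative decomposition, same cost.

-- ===== PORT A =====
-- ('.getD []' only discharges split?'s empty-separator case, which the literal "." never hits)
def find_path_segments (flat_key : String) (intermediate_paths : List String) : List String :=
  let parts := (PySem.Str.split? flat_key ".").getD []
  let st := (PySem.List.enumerate parts 0).foldl
    (fun (s : List String × List String) (ip : Int × String) =>
      let cur := s.2 ++ [ip.2]
      let current_path := PySem.Str.join "." (PySem.List.slice parts none (some (ip.1 + 1)))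
      if intermediate_paths.contains current_path then
        (s.1 ++ [PySem.Str.join "." cur], [])
      else (s.1, cur))
    ([], [])
  if st.2 ≠ [] then st.1 ++ [PySem.Str.join "." st.2] else st.1

-- ===== PORT B =====
def find_path_segments_alt (flat_key : String) (intermediate_paths : List String) : List String :=
  let parts := (PySem.Str.split? flat_key ".").getD []
  let boundaries := (PySem.List.pyRange 0 (parts.length : Int) 1).filter
    (fun i => intermediate_paths.contains (PySem.Str.join "." (PySem.List.slice parts none (some (i + 1)))))
  let st := boundaries.foldl
    (fun (s : List String × Int) (b : Int) =>
      (s.1 ++ [PySem.Str.join "." (PySem.List.slice parts (some s.2) (some (b + 1)))], b + 1))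
    (([] : List String), (0 : Int))
  if st.2 < (parts.length : Int) then
    st.1 ++ [PySem.Str.join "." (PySem.List.slice parts (some st.2) none)]
  else st.1

-- ===== PRECONDITION & SPEC =====
def Spec_find_path_segments (flat_key : String) (intermediate_paths : List String) (out : List String) : Prop := out = find_path_segments_alt flat_key intermediate_paths
instance (flat_key : String) (intermediate_paths : List String) (out : List String) : Decidable (Spec_find_path_segments flat_key intermediate_paths out) := by unfold Spec_find_path_segments; infer_instance

-- ===== CLAIM (what is proved, stated in full; the proofs are below) =====
def Claim_equal_find_path_segments : Prop := ∀ (flat_key : String) (intermediate_paths : List String), Dom_find_path_segments flat_key intermediate_paths → Spec_find_path_segments flat_key intermediate_paths (find_path_segments flat_key intermediate_paths)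

-- ===== LEMMAS AND PROOFS =====

-- common reference segmentation: from index i, current segment started at start
def pvGo (P : Int → Bool) (parts : List String) (i start : Nat) : List String :=
  if _h : i < parts.length then
    if P (i : Int) then
      PySem.Str.join "." ((parts.drop start).take (i + 1 - start)) :: pvGo P parts (i + 1) (i + 1)
    else pvGo P parts (i + 1) start
  else if start < parts.length then [PySem.Str.join "." (parts.drop start)] else []
termination_by parts.length - i

-- A's loop (from index i, segment accumulator = parts[start:i]) computes pvGo
lemma pvA_loop (parts : List String) (P : Int → Bool)
    (k : Nat) : ∀ (i start : Nat) (res : List String), i + k = parts.length → start ≤ i →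
    (let st := (PySem.List.enumerate (parts.drop i) (i : Int)).foldl
        (fun (s : List String × List String) (ip : Int × String) =>
          let cur := s.2 ++ [ip.2]
          if P ip.1 then (s.1 ++ [PySem.Str.join "." cur], []) else (s.1, cur))
        (res, (parts.drop start).take (i - start));
      if st.2 ≠ [] then st.1 ++ [PySem.Str.join "." st.2] else st.1)
    = res ++ pvGo P parts i start := by
  induction k with
  | zero =>
    intro i start res hk hs
    have hi : i = parts.length := by omega
    subst hi
    simp only [List.drop_length, PySem.List.enumerate_nil, List.foldl_nil]
    rw [pvGo]
    by_cases h : start < parts.length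
    · have hne : (parts.drop start).take (parts.length - start) ≠ [] := by
        intro hnil
        have := congrArg List.length hnil
        simp [List.length_take, List.length_drop] at this
        omega
      have htake : (parts.drop start).take (parts.length - start) = parts.drop start := by
        apply List.take_of_length_le; simp
      simp [h, htake]
    · have hse : start = parts.length := by omega
      subst hse
      simp
  | succ k ih =>
    intro i start res hk hs
    have hi : i < parts.length := by omega
    have hdrop : parts.drop i = parts[i] :: parts.drop (i + 1) :=
      List.drop_eq_getElem_cons hi
    simp only [hdrop, PySem.List.enumerate_cons, List.foldl_cons]
    have hcur : (parts.drop start).take (i - start) ++ [parts[i]]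
        = (parts.drop start).take (i + 1 - start) := by
      have h1 : i + 1 - start = (i - start) + 1 := by omega
      rw [h1, List.take_add_one]
      have : (parts.drop start)[i - start]? = some parts[i] := by
        rw [List.getElem?_drop]
        have : start + (i - start) = i := by omega
        rw [this, List.getElem?_eq_getElem hi]
      rw [this]
      rfl
    by_cases hp : P (i : Int)
    · simp only [hp, if_pos, hcur]
      have := ih (i + 1) (i + 1) (res ++ [PySem.Str.join "." ((parts.drop start).take (i + 1 - start))]) (by omega) (by omega)
      simp only [Nat.sub_self, List.take_zero] at this
      push_cast at this ⊢
      rw [this]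
      conv_rhs => rw [pvGo]
      simp [hi, hp]
    · simp only [hp, hcur]
      have := ih (i + 1) start (res) (by omega) (by omega)
      push_cast at this ⊢
      rw [this]
      conv_rhs => rw [pvGo]
      simp [hi, hp]

-- B's loop over the remaining boundaries (cursor = start) computes pvGo
lemma pvB_loop (parts : List String) (P : Int → Bool)
    (k : Nat) : ∀ (i start : Nat) (res : List String), i + k = parts.length → start ≤ i →
    (let st := ((PySem.List.pyRange (i : Int) (parts.length : Int) 1).filter P).foldl
        (fun (s : List String × Int) (b : Int) =>
          (s.1 ++ [PySem.Str.join "." (PySem.List.slice parts (some s.2) (some (b + 1)))], b + 1))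
        (res, (start : Int));
      if st.2 < (parts.length : Int) then
        st.1 ++ [PySem.Str.join "." (PySem.List.slice parts (some st.2) none)]
      else st.1)
    = res ++ pvGo P parts i start := by
  induction k with
  | zero =>
    intro i start res hk hs
    have hi : i = parts.length := by omega
    subst hi
    rw [PySem.List.pyRange_one_eq_nil (by omega)]
    simp only [List.filter_nil, List.foldl_nil]
    rw [pvGo]
    by_cases h : start < parts.length
    · simp [h, (by exact_mod_cast h : (start : Int) < (parts.length : Int)), PySem.List.slice_from_natCast]
    · have hse : start = parts.length := by omega
      subst hse
      simp
  | succ k ih =>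
    intro i start res hk hs
    have hi : i < parts.length := by omega
    rw [PySem.List.pyRange_one_cons (by exact_mod_cast hi)]
    by_cases hp : P (i : Int)
    · simp only [List.filter_cons, hp, if_pos, List.foldl_cons]
      have hslice : PySem.List.slice parts (some (start : Int)) (some ((i : Int) + 1))
          = (parts.drop start).take (i + 1 - start) := by
        have : ((i : Int) + 1) = ((i + 1 : Nat) : Int) := by push_cast; ring
        rw [this, PySem.List.slice_natCast]
      have := ih (i + 1) (i + 1) (res ++ [PySem.Str.join "." ((parts.drop start).take (i + 1 - start))]) (by omega) (by omega)
      push_cast at this ⊢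
      simp only [hslice]
      rw [this]
      conv_rhs => rw [pvGo]
      simp [hi, hp]
    · simp only [List.filter_cons, hp]
      have := ih (i + 1) start res (by omega) (by omega)
      push_cast at this ⊢
      rw [this]
      conv_rhs => rw [pvGo]
      simp [hi, hp]

-- ===== VERDICT (by name: the statement is the Claim_ definition above) =====
theorem find_path_segments_spec : Claim_equal_find_path_segments := by
  intro flat_key intermediate_paths _
  unfold Spec_find_path_segments find_path_segments find_path_segments_alt
  have hA := pvA_loop ((PySem.Str.split? flat_key ".").getD [])
    (fun b => intermediate_paths.contains
      (PySem.Str.join "." (PySem.List.slice ((PySem.Str.split? flat_key ".").getD []) none (some (b + 1)))))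
    ((PySem.Str.split? flat_key ".").getD []).length 0 0 [] (by omega) (Nat.le_refl 0)
  have hB := pvB_loop ((PySem.Str.split? flat_key ".").getD [])
    (fun b => intermediate_paths.contains
      (PySem.Str.join "." (PySem.List.slice ((PySem.Str.split? flat_key ".").getD []) none (some (b + 1)))))
    ((PySem.Str.split? flat_key ".").getD []).length 0 0 [] (by omega) (Nat.le_refl 0)
  exact hA.trans hB.symm
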